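-- pv_equiv track=rewrite | github.com/marwafar/Python-practice | maximum69number.py | maximum_69_number
-- ===== SOURCE A (Python) =====
-- def maximum_69_number (num):
--         """
--         :type num: int
--         :rtype: int
--         """
--
--         string = str(num)
--         new_list=[]
--         length=len(string)
--         count=0
--         for index in range(length):
--             if string[index]=='6' and count < 1:
--                 count+=1
--                 new_list.append('9')
--             else:
--                 new_list.append(string[index])
--
--         return int(''.join(new_list))
-- ===== SOURCE B (Python) =====
-- def maximum_69_number(num):
--     s = str(num)
--     i = s.find('6')
--     new_s = s if i == -1 else s[:i] + '9' + s[i + 1:]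
--     return int(new_s)
-- ===== Notes on version B (the rewrite author's own statement) =====
-- stated objective: simpler
-- what changed: Instead of scanning every character in a Python loop while carrying a replacement counter and rebuilding the string as a list, B locates the first '6' with str.find and splices in a '9' with two slices, parsing the result once.
import Mathlib
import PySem

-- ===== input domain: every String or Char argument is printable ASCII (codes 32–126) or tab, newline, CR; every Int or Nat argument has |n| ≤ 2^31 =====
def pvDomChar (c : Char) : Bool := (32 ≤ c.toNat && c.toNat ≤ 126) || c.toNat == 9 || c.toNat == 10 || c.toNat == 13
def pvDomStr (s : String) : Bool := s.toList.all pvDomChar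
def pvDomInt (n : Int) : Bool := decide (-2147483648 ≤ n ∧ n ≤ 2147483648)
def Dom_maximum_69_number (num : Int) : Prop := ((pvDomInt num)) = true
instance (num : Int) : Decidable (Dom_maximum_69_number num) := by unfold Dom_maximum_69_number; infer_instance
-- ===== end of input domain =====

-- B replaces A's per-character loop (with a replacement counter) by find-the-first-'6' plus
-- two slices around a '9'; same return value on every int.

-- ===== PORT A =====
-- literal transliteration of A: build new_list char by char over range(len(string)),
-- replacing the first '6' (count < 1) by '9', then int(''.join(new_list)).
-- string[index] is always in range (index from range(len(string))), so pyGetD's default is unreachable;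
-- int() is applied to str(num) with at most one digit '6' replaced by '9', so it always parses (getD 0 unreachable).
def maximum_69_number (num : Int) : Int :=
  let string := PySem.Int.toStr num
  let length := PySem.Str.len string
  let st := (PySem.List.pyRange 0 length 1).foldl
    (fun (st : List Char × Int) (index : Int) =>
      if PySem.List.pyGetD string.toList index ' ' = '6' ∧ st.2 < 1 then
        (st.1 ++ ['9'], st.2 + 1)
      else
        (st.1 ++ [PySem.List.pyGetD string.toList index ' '], st.2))
    (([] : List Char), (0 : Int))
  (PySem.Int.ofChars? st.1).getD 0

-- ===== PORT B =====
-- literal transliteration of B: i = s.find('6'); new_s = s if i == -1 else s[:i] + '9' + s[i+1:];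
-- int(new_s)  (string splicing done on the toList side, as PySem defines string ops; the parse
-- always succeeds for the same reason as in A, so getD 0 is unreachable).
def maximum_69_number_alt (num : Int) : Int :=
  let s := PySem.Int.toStr num
  let i := PySem.Str.find s "6"
  let newS : List Char :=
    if i = -1 then s.toList
    else PySem.List.slice s.toList none (some i) ++ ['9'] ++ PySem.List.slice s.toList (some (i + 1)) none
  (PySem.Int.ofChars? newS).getD 0

-- ===== PRECONDITION & SPEC =====
def Spec_maximum_69_number (num : Int) (out : Int) : Prop := out = maximum_69_number_alt num
instance (num : Int) (out : Int) : Decidable (Spec_maximum_69_number num out) := by unfold Spec_maximum_69_number; infer_instance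

-- ===== CLAIM (what is proved, stated in full; the proofs are below) =====
def Claim_equal_maximum_69_number : Prop := ∀ (num : Int), Dom_maximum_69_number num → Spec_maximum_69_number num (maximum_69_number num)

-- ===== LEMMAS AND PROOFS =====

-- A's loop body as a function of the current character (proof-side name for A's fold step).
def pvStep (st : List Char × Int) (c : Char) : List Char × Int :=
  if c = '6' ∧ st.2 < 1 then (st.1 ++ ['9'], st.2 + 1) else (st.1 ++ [c], st.2)

-- once the counter is 1, the loop just copies the remaining characters
theorem pvStep_done (cs : List Char) : ∀ acc : List Char,
    cs.foldl pvStep (acc, 1) = (acc ++ cs, 1) := by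
  induction cs with
  | nil => intro acc; simp
  | cons c t ih =>
    intro acc
    have : pvStep (acc, 1) c = (acc ++ [c], 1) := by simp [pvStep]
    simp only [List.foldl_cons, this, ih]
    simp

-- if there is no '6', the loop copies the whole string and the counter stays 0
theorem pvStep_no6 (cs : List Char) : ∀ acc : List Char, '6' ∉ cs →
    cs.foldl pvStep (acc, 0) = (acc ++ cs, 0) := by
  induction cs with
  | nil => intro acc _; simp
  | cons c t ih =>
    intro acc h
    have hc : c ≠ '6' := by intro hc; exact h (by simp [hc])
    have : pvStep (acc, 0) c = (acc ++ [c], 0) := by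
      simp only [pvStep]
      rw [if_neg]
      rintro ⟨h', -⟩; exact hc h'
    simp only [List.foldl_cons, this, ih _ (fun hm => h (List.mem_cons_of_mem _ hm))]
    simp

-- if the first '6' is at index n, the loop yields take n ++ '9' ++ drop (n+1) with counter 1
theorem pvStep_first6 (cs : List Char) : ∀ (n : Nat) (acc : List Char),
    cs[n]? = some '6' → (∀ j, j < n → cs[j]? ≠ some '6') →
    cs.foldl pvStep (acc, 0) = (acc ++ cs.take n ++ ['9'] ++ cs.drop (n + 1), 1) := by
  induction cs with
  | nil => intro n acc h _; simp at h
  | cons c t ih =>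
    intro n acc h hmin
    cases n with
    | zero =>
      simp at h
      have : pvStep (acc, 0) c = (acc ++ ['9'], 1) := by simp [pvStep, h]
      simp only [List.foldl_cons, this, pvStep_done]
      simp
    | succ n =>
      have hc : c ≠ '6' := by
        intro hc
        exact hmin 0 (Nat.succ_pos _) (by simp [hc])
      have hstep : pvStep (acc, 0) c = (acc ++ [c], 0) := by
        simp only [pvStep]
        rw [if_neg]
        rintro ⟨h', -⟩; exact hc h'
      have ht : t[n]? = some '6' := by simpa using h
      have htmin : ∀ j, j < n → t[j]? ≠ some '6' := by
        intro j hj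
        have := hmin (j + 1) (Nat.succ_lt_succ hj)
        simpa using this
      simp only [List.foldl_cons, hstep, ih n (acc ++ [c]) ht htmin]
      simp

-- a singleton pattern is an infix iff the character occurs
theorem single_infix (c : Char) (cs : List Char) (h : c ∈ cs) : [c] <:+: cs := by
  rcases List.append_of_mem h with ⟨s, t, rfl⟩
  exact ⟨s, t, by simp⟩

-- a singleton pattern is a prefix iff it is the first element
theorem single_prefix (c : Char) (cs : List Char) : [c] <+: cs ↔ cs[0]? = some c := by
  cases cs with
  | nil => simp
  | cons a t =>
    constructor
    · intro h
      rcases List.cons_prefix_cons.mp h with ⟨rfl, -⟩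
      simp
    · intro h
      simp at h
      exact List.cons_prefix_cons.mpr ⟨h.symm, List.nil_prefix⟩

theorem find6_pos (cs : List Char) (h : 0 ≤ PySem.Chars.find cs ['6']) :
    cs[(PySem.Chars.find cs ['6']).toNat]? = some '6' ∧
    (∀ j, j < (PySem.Chars.find cs ['6']).toNat → cs[j]? ≠ some '6') := by
  obtain ⟨h1, h2⟩ := PySem.Chars.find_spec (s := cs) (sub := ['6']) h
  constructor
  · have := (single_prefix '6' _).mp h1
    simpa [List.getElem?_drop] using this
  · intro j hj hj6
    exact h2 j hj ((single_prefix '6' _).mpr (by simpa [List.getElem?_drop] using hj6))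

-- ===== VERDICT (by name: the statement is the Claim_ definition above) =====
theorem maximum_69_number_spec : Claim_equal_maximum_69_number := by
  intro num _
  unfold Spec_maximum_69_number maximum_69_number maximum_69_number_alt
  simp only [PySem.Str.len_eq, PySem.Str.find_eq]
  set cs := (PySem.Int.toStr num).toList with hcs
  rw [show (fun (st : List Char × Int) (index : Int) =>
      if PySem.List.pyGetD cs index ' ' = '6' ∧ st.2 < 1 then
        (st.1 ++ ['9'], st.2 + 1)
      else
        (st.1 ++ [PySem.List.pyGetD cs index ' '], st.2)) =
      (fun (st : List Char × Int) (index : Int) => pvStep st (PySem.List.pyGetD cs index ' ')) from rfl]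
  rw [PySem.List.foldl_pyRange_zero_pyGetD' cs ' ' pvStep (([] : List Char), (0 : Int))]
  have hsub : ("6" : String).toList = ['6'] := rfl
  rw [hsub]
  have hge : -1 ≤ PySem.Chars.find cs ['6'] := PySem.Chars.neg_one_le_find cs ['6']
  by_cases hneg : PySem.Chars.find cs ['6'] = -1
  · -- no '6' anywhere: the loop copies the string, B keeps it unchanged
    have hmem : '6' ∉ cs := by
      intro hm
      exact (PySem.Chars.find_eq_neg_one_iff cs ['6']).mp hneg (single_infix '6' cs hm)
    rw [pvStep_no6 cs [] hmem, if_pos hneg]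
    simp
  · -- first '6' at index i ≥ 0: the loop splices exactly B's take/drop around '9'
    have hpos : 0 ≤ PySem.Chars.find cs ['6'] := by omega
    obtain ⟨h6, hmin⟩ := find6_pos cs hpos
    rw [pvStep_first6 cs (PySem.Chars.find cs ['6']).toNat [] h6 hmin, if_neg hneg,
      PySem.List.slice_to cs hpos, PySem.List.slice_from cs (by omega : (0:Int) ≤ PySem.Chars.find cs ['6'] + 1)]
    have : (PySem.Chars.find cs ['6'] + 1).toNat = (PySem.Chars.find cs ['6']).toNat + 1 := by omega
    rw [this]
    simp
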